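-- pv_equiv track=rewrite | github.com/VRCMF/LangEdit | glue_eval/useful_functions.py | get_sublist_wikiann
-- ===== SOURCE A (Python) =====
-- def get_sublist_wikiann(elements, number_of_few_shots):
--         sublist = []
--
--         # 找到第一个 label 为 0 的元素
--         # ipdb.set_trace()
--         for element in elements:
--             if 'ORG' in element['label']:
--                 sublist.append(element)
--                 break
--
--         # 找到第一个 label 为 1 的元素
--         for element in elements:
--             if 'PER' in element['label']:
--                 sublist.append(element)
--                 break
--
--         # 找到第一个 label 为 2 的元素
--         for element in elements:
--             if 'LOC' in element['label']:
--                 sublist.append(element)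
--                 break
--
--         return sublist
-- ===== SOURCE B (Python) =====
-- def get_sublist_wikiann(elements, number_of_few_shots):
--     org = per = loc = None
--     for element in elements:
--         label = element['label']
--         if org is None and 'ORG' in label:
--             org = element
--         if per is None and 'PER' in label:
--             per = element
--         if loc is None and 'LOC' in label:
--             loc = element
--         if org is not None and per is not None and loc is not None:
--             break
--     return [e for e in (org, per, loc) if e is not None]
-- ===== Notes on version B (the rewrite author's own statement) =====
-- stated objective: alternative
-- what changed: Replaces A's three separate scans of the list (one per label) with a single pass maintaining three optional slots, breaking once all three are filled and emitting the slots in fixed ORG/PER/LOC order.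
import Mathlib
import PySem

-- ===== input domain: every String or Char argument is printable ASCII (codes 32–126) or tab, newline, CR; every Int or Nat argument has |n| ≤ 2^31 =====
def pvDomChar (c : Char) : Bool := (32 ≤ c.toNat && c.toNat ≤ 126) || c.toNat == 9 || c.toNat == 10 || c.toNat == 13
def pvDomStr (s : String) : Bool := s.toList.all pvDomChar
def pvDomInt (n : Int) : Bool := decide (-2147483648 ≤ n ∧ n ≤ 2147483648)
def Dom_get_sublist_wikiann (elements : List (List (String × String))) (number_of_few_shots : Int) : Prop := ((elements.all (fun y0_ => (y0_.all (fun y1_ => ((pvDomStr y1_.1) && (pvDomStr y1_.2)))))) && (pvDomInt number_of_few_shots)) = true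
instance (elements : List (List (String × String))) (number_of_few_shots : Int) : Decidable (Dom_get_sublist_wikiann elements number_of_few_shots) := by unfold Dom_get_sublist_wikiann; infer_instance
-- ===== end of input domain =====

-- B replaces A's three separate scans (one per label) by a single pass with three optional
-- slots, breaking once all are filled and emitting the slots in fixed ORG/PER/LOC order;
-- same cost class, different decomposition.


-- ===== PORT A =====
-- each Python 'for … if … break' loop: first element whose 'label' contains the needle
-- (missing 'label' ⇒ Python raises KeyError; excluded by Pre_, so the getD default "" is never hit there)
def pvFindA (needle : String) : List (List (String × String)) → Option (List (String × String))
  | [] => none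
  | e :: rest =>
    if PySem.Str.isIn needle (PySem.Dict.getD (PySem.Dict.mk e) "label" "") then some e else pvFindA needle rest

def get_sublist_wikiann (elements : List (List (String × String))) (number_of_few_shots : Int) : List (List (String × String)) :=
  let sublist : List (List (String × String)) := []
  let sublist := match pvFindA "ORG" elements with
    | some e => sublist ++ [e]
    | none => sublist
  let sublist := match pvFindA "PER" elements with
    | some e => sublist ++ [e]
    | none => sublist
  let sublist := match pvFindA "LOC" elements with
    | some e => sublist ++ [e]
    | none => sublist
  sublist

-- ===== PORT B =====
-- single pass: fill still-empty slots, break once all three are filled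
def pvLoopB (o p l : Option (List (String × String))) :
    List (List (String × String)) →
    Option (List (String × String)) × Option (List (String × String)) × Option (List (String × String))
  | [] => (o, p, l)
  | e :: rest =>
    let lab := PySem.Dict.getD (PySem.Dict.mk e) "label" ""
    let o' := if o.isNone && PySem.Str.isIn "ORG" lab then some e else o
    let p' := if p.isNone && PySem.Str.isIn "PER" lab then some e else p
    let l' := if l.isNone && PySem.Str.isIn "LOC" lab then some e else l
    if o'.isSome && p'.isSome && l'.isSome then (o', p', l') else pvLoopB o' p' l' rest

def get_sublist_wikiann_alt (elements : List (List (String × String))) (number_of_few_shots : Int) : List (List (String × String)) :=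
  let r := pvLoopB none none none elements
  r.1.toList ++ r.2.1.toList ++ r.2.2.toList

-- ===== PRECONDITION & SPEC =====
-- an element of e lacking the key 'label' makes Python's A raise KeyError iff it is still
-- scanned by one of the three loops (i.e. that loop found no match strictly before it);
-- Pre_ excludes exactly those inputs (A raises there, nothing else is excluded)
def pvHasMatch (needle : String) (e : List (String × String)) : Bool :=
  match PySem.Dict.get? (PySem.Dict.mk e) "label" with
  | some lab => PySem.Str.isIn needle lab
  | none => false

-- Boolean form of: every element still scanned by one of the three loops
-- (that loop has no match strictly before it) must carry the key 'label'
def Pre_get_sublist_wikiann (elements : List (List (String × String))) (number_of_few_shots : Int) : Prop :=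
  ((List.range elements.length).all (fun i =>
    !(!((elements.take i).any (pvHasMatch "ORG")) ||
      !((elements.take i).any (pvHasMatch "PER")) ||
      !((elements.take i).any (pvHasMatch "LOC"))) ||
    (PySem.Dict.get? (PySem.Dict.mk (elements.getD i [])) "label").isSome)) = true

instance (elements : List (List (String × String))) (number_of_few_shots : Int) : Decidable (Pre_get_sublist_wikiann elements number_of_few_shots) := by unfold Pre_get_sublist_wikiann; infer_instance

def pvWitness_get_sublist_wikiann : (List (List (String × String))) × Int :=
  ([[("label", "B-ORG"), ("word", "UN")], [("label", "I-PER")], [("label", "O")]], 3)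

def Spec_get_sublist_wikiann (elements : List (List (String × String))) (number_of_few_shots : Int) (out : List (List (String × String))) : Prop := out = get_sublist_wikiann_alt elements number_of_few_shots
instance (elements : List (List (String × String))) (number_of_few_shots : Int) (out : List (List (String × String))) : Decidable (Spec_get_sublist_wikiann elements number_of_few_shots out) := by unfold Spec_get_sublist_wikiann; infer_instance

-- ===== CLAIM (what is proved, stated in full; the proofs are below) =====
def Claim_equal_get_sublist_wikiann : Prop := ∀ (elements : List (List (String × String))) (number_of_few_shots : Int), Dom_get_sublist_wikiann elements number_of_few_shots → Pre_get_sublist_wikiann elements number_of_few_shots → Spec_get_sublist_wikiann elements number_of_few_shots (get_sublist_wikiann elements number_of_few_shots)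

-- ===== LEMMAS AND PROOFS =====

-- filling a still-empty slot then falling back to the remaining scan equals
-- falling back to the scan that starts at this element
theorem pvSlotStep (o : Option (List (String × String))) (e : List (String × String)) (m : Bool)
    (r : Option (List (String × String))) :
    (if o.isNone && m then some e else o).or r = o.or (if m then some e else r) := by
  cases o <;> cases m <;> simp

-- a filled slot ignores the fallback
theorem pvOrSome {α : Type} (o r : Option α) (h : o.isSome = true) : o.or r = o := by
  cases o <;> simp_all

-- the single slot-filling pass computes, per slot, "already filled, else first match"
theorem pvLoopB_eq (xs : List (List (String × String))) :
    ∀ o p l, pvLoopB o p l xs =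
      (o.or (pvFindA "ORG" xs), p.or (pvFindA "PER" xs), l.or (pvFindA "LOC" xs)) := by
  induction xs with
  | nil => intro o p l; simp [pvLoopB, pvFindA]
  | cons e rest ih =>
    intro o p l
    simp only [pvLoopB, pvFindA]
    by_cases hc :
        ((if o.isNone && PySem.Str.isIn "ORG" (PySem.Dict.getD (PySem.Dict.mk e) "label" "") then some e else o).isSome &&
         (if p.isNone && PySem.Str.isIn "PER" (PySem.Dict.getD (PySem.Dict.mk e) "label" "") then some e else p).isSome &&
         (if l.isNone && PySem.Str.isIn "LOC" (PySem.Dict.getD (PySem.Dict.mk e) "label" "") then some e else l).isSome) = true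
    · rw [Bool.and_eq_true, Bool.and_eq_true] at hc
      obtain ⟨⟨ho, hp⟩, hl⟩ := hc
      rw [if_pos (by rw [Bool.and_eq_true, Bool.and_eq_true]; exact ⟨⟨ho, hp⟩, hl⟩),
          ← pvSlotStep o e _ (pvFindA "ORG" rest), ← pvSlotStep p e _ (pvFindA "PER" rest),
          ← pvSlotStep l e _ (pvFindA "LOC" rest),
          pvOrSome _ _ ho, pvOrSome _ _ hp, pvOrSome _ _ hl]
    · rw [if_neg hc, ih, pvSlotStep o e _ (pvFindA "ORG" rest),
          pvSlotStep p e _ (pvFindA "PER" rest), pvSlotStep l e _ (pvFindA "LOC" rest)]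

-- ===== VERDICT (by name: the statement is the Claim_ definition above) =====
theorem get_sublist_wikiann_spec : Claim_equal_get_sublist_wikiann := by
  intro elements number_of_few_shots _ _
  unfold Spec_get_sublist_wikiann get_sublist_wikiann get_sublist_wikiann_alt
  rw [pvLoopB_eq]
  cases pvFindA "ORG" elements <;> cases pvFindA "PER" elements <;>
    cases pvFindA "LOC" elements <;> simp
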